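-- pv_equiv track=rewrite | github.com/MatKrzykowski/Python_scripts | Project Euler/Problem 145.py | is_reversible
-- ===== SOURCE A (Python) =====
-- def is_reversible(i):
--     if i[-1] == '0':
--         return False
--     leading_1 = False
--     for x, y in zip(i, i[::-1]):
--         z = int(x) + int(y)
--         if leading_1 and z%2 == 1:
--             return False
--         if not leading_1 and z%2 == 0:
--             return False
--         leading_1 = z > 9
--     return True
-- ===== SOURCE B (Python) =====
-- def is_reversible(i):
--     if i[-1] == '0':
--         return False
--     n = 0
--     for c in i:
--         n = n * 10 + int(c)
--     rev = 0
--     for c in reversed(i):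
--         rev = rev * 10 + int(c)
--     return all(int(d) % 2 == 1 for d in str(n + rev))
-- ===== Notes on version B (the rewrite author's own statement) =====
-- stated objective: simpler
-- what changed: Instead of A's single symmetric pass that tracks a carry flag and checks each pairwise digit sum's parity against it, B materializes the actual arithmetic sum n + reverse(n) and checks that every digit of the sum is odd.
-- outside the precondition, e.g. on is_reversible('2x2'): A returns False, B raises ValueError
import Mathlib
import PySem

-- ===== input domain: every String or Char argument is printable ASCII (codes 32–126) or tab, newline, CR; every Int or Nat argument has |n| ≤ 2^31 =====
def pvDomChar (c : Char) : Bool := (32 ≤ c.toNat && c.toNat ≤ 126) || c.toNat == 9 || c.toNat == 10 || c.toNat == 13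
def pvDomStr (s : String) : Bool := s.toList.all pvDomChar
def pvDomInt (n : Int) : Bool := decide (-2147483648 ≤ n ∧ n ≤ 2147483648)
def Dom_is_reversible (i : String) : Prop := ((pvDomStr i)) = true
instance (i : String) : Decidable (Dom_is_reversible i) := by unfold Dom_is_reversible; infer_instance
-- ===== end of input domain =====

-- B replaces A's symmetric carry-tracking pass by materializing the arithmetic sum n + reverse(n)
-- and checking that every digit of the sum is odd (objective: simpler; same O(L) cost).

-- int(x) for a one-character string x (exact: Python's int() on a 1-char string)
def pvIntC (c : Char) : Int := (PySem.Int.ofChars? [c]).getD 0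

-- ===== PORT A =====
def pvALoop : List (Char × Char) → Bool → Bool
  | [], _ => true
  | (x, y) :: rest, lead =>
    let z : Int := pvIntC x + pvIntC y
    if lead && (PySem.Int.mod z 2 == 1) then false
    else if !lead && (PySem.Int.mod z 2 == 0) then false
    else pvALoop rest (decide (9 < z))

def is_reversible (i : String) : Bool :=
  if (PySem.Str.pyGet? i (-1)).getD ' ' == '0' then false
  else pvALoop (i.toList.zip ((PySem.Str.slice? i none none (-1)).getD "").toList) false

-- ===== PORT B =====
def is_reversible_alt (i : String) : Bool :=
  if (PySem.Str.pyGet? i (-1)).getD ' ' == '0' then false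
  else
    let n : Int := i.toList.foldl (fun a c => a * 10 + pvIntC c) 0
    let rev : Int := i.toList.reverse.foldl (fun a c => a * 10 + pvIntC c) 0
    (PySem.Int.toChars (n + rev)).all (fun d => PySem.Int.mod (pvIntC d) 2 == 1)

-- ===== PRECONDITION & SPEC =====
-- Pre_ excludes inputs where A raises (empty string: IndexError; a non-digit character when the
-- final character is not the zero digit: ValueError from int()), and additionally strings with a
-- non-digit strictly inside whose scan happens to fail a parity check before reaching the
-- non-digit, on which A's early False is an artefact of lazy evaluation order and B raises
-- (see the cite in claim.json).
def Pre_is_reversible (i : String) : Prop :=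
  i.toList ≠ [] ∧ (i.toList.getLast? = some '0' ∨ i.toList.all PySem.Chars.isdigit = true)
instance (i : String) : Decidable (Pre_is_reversible i) := by unfold Pre_is_reversible; infer_instance

def pvWitness_is_reversible : String := "36"

def Spec_is_reversible (i : String) (out : Bool) : Prop := out = is_reversible_alt i
instance (i : String) (out : Bool) : Decidable (Spec_is_reversible i out) := by unfold Spec_is_reversible; infer_instance

-- ===== CLAIM (what is proved, stated in full; the proofs are below) =====
def Claim_equal_is_reversible : Prop := ∀ (i : String), Dom_is_reversible i → Pre_is_reversible i → Spec_is_reversible i (is_reversible i)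

-- ===== LEMMAS AND PROOFS =====

-- digit value of a digit character
def pvDv (c : Char) : Nat := c.toNat - 48

-- little-endian base-10 value of a list of (possibly ≥ 10) "digits"
def pvValLE : List Nat → Nat
  | [] => 0
  | z :: t => z + 10 * pvValLE t

-- A's loop, expressed on the list of pairwise digit sums
def pvChainA : List Nat → Bool → Bool
  | [], _ => true
  | z :: t, lead =>
    if lead && (z % 2 == 1) then false
    else if !lead && (z % 2 == 0) then false
    else pvChainA t (decide (9 < z))

lemma pv_digit_cases (c : Char) (h : PySem.Chars.isdigit c = true) :
    c = '0' ∨ c = '1' ∨ c = '2' ∨ c = '3' ∨ c = '4' ∨ c = '5' ∨ c = '6' ∨ c = '7' ∨ c = '8' ∨ c = '9' := by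
  simp only [PySem.Chars.isdigit, Bool.and_eq_true, decide_eq_true_eq] at h
  obtain ⟨h1, h2⟩ := h
  have h1' : 48 ≤ c.toNat := h1
  have h2' : c.toNat ≤ 57 := h2
  have hc : c = Char.ofNat c.toNat := (Char.ofNat_toNat c).symm
  interval_cases h : c.toNat <;> rw [hc] <;> decide

lemma pv_intC_digit (c : Char) (h : PySem.Chars.isdigit c = true) :
    pvIntC c = (pvDv c : Int) := by
  rcases pv_digit_cases c h with h'|h'|h'|h'|h'|h'|h'|h'|h'|h' <;> subst h' <;> decide

lemma pv_dv_le (c : Char) (h : PySem.Chars.isdigit c = true) : pvDv c ≤ 9 := by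
  rcases pv_digit_cases c h with h'|h'|h'|h'|h'|h'|h'|h'|h'|h' <;> subst h' <;> decide

lemma pv_dv_pos (c : Char) (h : PySem.Chars.isdigit c = true) (h0 : c ≠ '0') : 1 ≤ pvDv c := by
  rcases pv_digit_cases c h with h'|h'|h'|h'|h'|h'|h'|h'|h'|h' <;> subst h' <;>
    first | exact absurd rfl h0 | decide

-- A's loop computes pvChainA of the pairwise digit sums
lemma pv_aloop_eq_chain (ps : List (Char × Char)) (lead : Bool)
    (h : ∀ p ∈ ps, PySem.Chars.isdigit p.1 = true ∧ PySem.Chars.isdigit p.2 = true) :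
    pvALoop ps lead = pvChainA (ps.map (fun p => pvDv p.1 + pvDv p.2)) lead := by
  induction ps generalizing lead with
  | nil => rfl
  | cons p rest ih =>
    obtain ⟨x, y⟩ := p
    obtain ⟨hx, hy⟩ := h (x, y) (List.mem_cons_self ..)
    have hrest := fun q hq => h q (List.mem_cons_of_mem _ hq)
    simp only [pvALoop, pvChainA, List.map_cons]
    rw [pv_intC_digit x hx, pv_intC_digit y hy]
    have hz : (pvDv x : Int) + (pvDv y : Int) = ((pvDv x + pvDv y : Nat) : Int) := by push_cast; ring
    rw [hz]
    set n := pvDv x + pvDv y with hn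
    have hmod : PySem.Int.mod (n : Int) 2 = ((n % 2 : Nat) : Int) := by
      rw [PySem.Int.mod_eq_emod_of_pos (by norm_num)]; push_cast; ring
    have h1 : (PySem.Int.mod (n : Int) 2 == 1) = (n % 2 == 1) := by
      rw [hmod]; simp; omega
    have h0 : (PySem.Int.mod (n : Int) 2 == 0) = (n % 2 == 0) := by
      rw [hmod]; simp; omega
    have h9 : (decide ((9:Int) < (n : Int))) = decide (9 < n) := by simp
    rw [h1, h0, h9, ih _ hrest]

lemma pv_valLE_append (l : List Nat) (z : Nat) :
    pvValLE (l ++ [z]) = pvValLE l + z * 10 ^ l.length := by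
  induction l with
  | nil => simp [pvValLE]
  | cons a t ih => simp [pvValLE, ih]; ring

-- B's horner fold computes the value of the digit string
lemma pv_horner (cs : List Char) (acc : Int)
    (h : ∀ c ∈ cs, PySem.Chars.isdigit c = true) :
    cs.foldl (fun a c => a * 10 + pvIntC c) acc
      = acc * 10 ^ cs.length + (pvValLE ((cs.map pvDv).reverse) : Int) := by
  induction cs generalizing acc with
  | nil => simp [pvValLE]
  | cons c t ih =>
    simp only [List.foldl_cons, List.map_cons, List.reverse_cons]
    rw [ih _ (fun d hd => h d (List.mem_cons_of_mem _ hd)),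
        pv_intC_digit c (h c (List.mem_cons_self ..)), pv_valLE_append]
    push_cast
    simp [List.length_cons]
    ring

lemma pv_valLE_add (as bs : List Nat) (h : as.length = bs.length) :
    pvValLE as + pvValLE bs = pvValLE (List.zipWith (· + ·) as bs) := by
  induction as generalizing bs with
  | nil => cases bs <;> simp_all [pvValLE]
  | cons a t ih =>
    cases bs with
    | nil => simp at h
    | cons b u => simp only [List.zipWith_cons_cons, pvValLE]; rw [← ih u (by simpa using h)]; ring

lemma pv_valLE_pos (l : List Nat) (h : l ≠ []) (hl : l.getLast? ≠ some 0) : 1 ≤ pvValLE l := by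
  induction l with
  | nil => simp at h
  | cons a t ih =>
    cases t with
    | nil => simp [List.getLast?] at hl; simp [pvValLE]; omega
    | cons b u =>
      have := ih (by simp) (by rwa [List.getLast?_cons_cons] at hl)
      simp [pvValLE] at this ⊢; omega

-- Nat.toDigitsCore writes the base-10 digits, most significant first
lemma pv_toDigitsCore_eq (n : Nat) (fuel : Nat) (ds : List Char) (h0 : 0 < n) (hf : n ≤ fuel) :
    Nat.toDigitsCore 10 fuel n ds = ((Nat.digits 10 n).map Nat.digitChar).reverse ++ ds := by
  induction n using Nat.strong_induction_on generalizing fuel ds with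
  | _ n ih =>
    match fuel with
    | 0 => omega
    | f + 1 =>
      rw [Nat.toDigitsCore]
      rw [Nat.digits_def' (by norm_num : (1:Nat) < 10) h0]
      by_cases hq : n / 10 = 0
      · simp [hq, Nat.digits_zero]
      · have hlt : n / 10 < n := Nat.div_lt_self h0 (by norm_num)
        rw [if_neg hq, ih (n / 10) hlt f _ (Nat.pos_of_ne_zero hq) (by omega)]
        simp

lemma pv_digitChar_dv (m : Nat) (hm : m < 10) :
    PySem.Chars.isdigit (Nat.digitChar m) = true ∧ pvDv (Nat.digitChar m) = m := by
  interval_cases m <;> exact ⟨by decide, by decide⟩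

-- B's digit-parity test over str(s) is the all-odd test on Nat.digits
lemma pv_all_toChars (s : Nat) (hs : 0 < s) :
    (PySem.Int.toChars (s : Int)).all (fun d => PySem.Int.mod (pvIntC d) 2 == 1)
      = (Nat.digits 10 s).all (fun m => m % 2 == 1) := by
  have h1 : PySem.Int.toChars (s : Int) = Nat.toDigits 10 s := by
    simp [PySem.Int.toChars]
  rw [h1, Nat.toDigits, pv_toDigitsCore_eq s (s+1) [] hs (by omega)]
  rw [List.append_nil, List.all_reverse]
  have hlt : ∀ m ∈ Nat.digits 10 s, m < 10 := fun m hm => Nat.digits_lt_base (by norm_num) hm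
  generalize Nat.digits 10 s = l at hlt ⊢
  induction l with
  | nil => rfl
  | cons m t ih =>
    obtain ⟨hd, hv⟩ := pv_digitChar_dv m (hlt m (List.mem_cons_self ..))
    simp only [List.map_cons, List.all_cons]
    rw [ih (fun x hx => hlt x (List.mem_cons_of_mem _ hx))]
    congr 1
    rw [pv_intC_digit _ hd, hv]
    have hmod : PySem.Int.mod (m : Int) 2 = ((m % 2 : Nat) : Int) := by
      rw [PySem.Int.mod_eq_emod_of_pos (by norm_num)]; push_cast; ring
    rw [hmod]
    simp; omega

-- the core equivalence: digits of the materialized sum are all odd iff A's carry chain accepts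
lemma pv_core (zs : List Nat) (c : Nat) (hz : ∀ z ∈ zs, z ≤ 18) (hc : c ≤ 1)
    (hl : zs.getLast? ≠ some 0) :
    (Nat.digits 10 (pvValLE zs + c)).all (fun m => m % 2 == 1) = pvChainA zs (decide (c = 1)) := by
  induction zs generalizing c with
  | nil =>
    interval_cases c <;> simp [pvValLE, pvChainA]
  | cons z t ih =>
    have hz0 : z ≤ 18 := hz z (List.mem_cons_self ..)
    have hs : pvValLE (z :: t) + c = (z + c) + 10 * (pvValLE t) := by simp [pvValLE]; ring
    have hspos : 0 < pvValLE (z :: t) + c := by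
      rcases List.eq_nil_or_concat t with h | _
      · subst h
        have : z ≠ 0 := by simpa [List.getLast?] using hl
        simp [pvValLE]; omega
      · have ht : t ≠ [] := by rintro rfl; simp_all
        have := pv_valLE_pos t ht
          (by cases t with | nil => simp_all | cons b u => rwa [List.getLast?_cons_cons] at hl)
        simp [pvValLE]; omega
    rw [Nat.digits_def' (by norm_num : (1:Nat) < 10) hspos]
    have hmod : (pvValLE (z :: t) + c) % 10 = (z + c) % 10 := by rw [hs]; omega
    have hdiv : (pvValLE (z :: t) + c) / 10 = pvValLE t + (z + c) / 10 := by rw [hs]; omega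
    rw [List.all_cons, hmod, hdiv]
    by_cases hp : (z + c) % 2 = 1
    · have hhead : ((z + c) % 10 % 2 == 1) = true := by simp; omega
      have hcar : (z + c) / 10 ≤ 1 := by omega
      have htl : t.getLast? ≠ some 0 := by
        cases t with
        | nil => simp
        | cons b u => rwa [List.getLast?_cons_cons] at hl
      rw [hhead, Bool.true_and, ih _ (fun x hx => hz x (List.mem_cons_of_mem _ hx)) hcar htl]
      have : pvChainA (z :: t) (decide (c = 1)) = pvChainA t (decide (9 < z)) := by
        simp only [pvChainA]
        interval_cases c
        · have : ¬ (z % 2 == 0) = true := by simp; omega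
          simp_all
        · have : ¬ (z % 2 == 1) = true := by simp; omega
          simp_all
      rw [this]
      congr 1
      interval_cases c <;> simp <;> omega
    · have hhead : ((z + c) % 10 % 2 == 1) = false := by simp; omega
      rw [hhead, Bool.false_and]
      have : pvChainA (z :: t) (decide (c = 1)) = false := by
        simp only [pvChainA]
        interval_cases c
        · have h2 : (z % 2 == 0) = true := by simp; omega
          simp_all
        · have h2 : (z % 2 == 1) = true := by simp; omega
          simp_all
      rw [this]

-- ===== VERDICT (by name: the statement is the Claim_ definition above) =====
theorem is_reversible_spec : Claim_equal_is_reversible := by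
  intro i _ hpre
  obtain ⟨hne, hcase⟩ := hpre
  unfold Spec_is_reversible is_reversible is_reversible_alt
  have hget : PySem.Str.pyGet? i (-1) = i.toList.getLast? := by
    simp [PySem.Str.pyGet?, PySem.Chars.pyGet?, PySem.List.pyGet?_neg_one]
  by_cases hg : i.toList.getLast? = some '0'
  · rw [hget, hg]
    simp
  · rw [hget]
    have hguard : ((i.toList.getLast?.getD ' ') == '0') = false := by
      cases hlc : i.toList.getLast? with
      | none => simp_all
      | some lc =>
        have : lc ≠ '0' := by rintro rfl; exact hg hlc
        simpa using this
    rw [hguard]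
    simp only [Bool.false_eq_true, if_false]
    -- all characters are digits
    have hdig : ∀ c ∈ i.toList, PySem.Chars.isdigit c = true := by
      rcases hcase with h | h
      · exact absurd h hg
      · exact fun c hc => List.all_eq_true.mp h c hc
    set cs := i.toList with hcs
    have hrev : ((PySem.Str.slice? i none none (-1)).getD "").toList = cs.reverse := by
      rw [PySem.Str.slice?_none_none_neg_one]
      simp [hcs]
    rw [hrev]
    set ds := cs.map pvDv with hds
    -- A side
    have hmem : ∀ p ∈ cs.zip cs.reverse, PySem.Chars.isdigit p.1 = true ∧ PySem.Chars.isdigit p.2 = true := by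
      intro p hp
      obtain ⟨x, y⟩ := p
      obtain ⟨h1, h2⟩ := List.of_mem_zip hp
      exact ⟨hdig x h1, hdig y (List.mem_reverse.mp h2)⟩
    rw [pv_aloop_eq_chain _ _ hmem]
    have hzs : (cs.zip cs.reverse).map (fun p => pvDv p.1 + pvDv p.2)
        = List.zipWith (· + ·) ds ds.reverse := by
      rw [hds, ← List.map_reverse, List.zipWith_map]
      simp [List.zip, List.map_zipWith]
    rw [hzs]
    set zs := List.zipWith (· + ·) ds ds.reverse with hzsdef
    -- B side
    have hdigrev : ∀ c ∈ cs.reverse, PySem.Chars.isdigit c = true :=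
      fun c hc => hdig c (List.mem_reverse.mp hc)
    rw [pv_horner cs 0 hdig, pv_horner cs.reverse 0 hdigrev]
    have e1 : (cs.map pvDv).reverse = ds.reverse := by rw [hds]
    have e2 : (cs.reverse.map pvDv).reverse = ds := by
      rw [List.map_reverse, List.reverse_reverse, hds]
    have hvsum : pvValLE ds.reverse + pvValLE ds = pvValLE zs := by
      rw [pv_valLE_add ds.reverse ds (by simp), hzsdef]
      congr 1
      exact List.zipWith_comm_of_comm (fun a b => Nat.add_comm a b)
    have hsum : (0 * 10 ^ cs.length + (pvValLE ((cs.map pvDv).reverse) : Int))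
        + (0 * 10 ^ cs.reverse.length + (pvValLE ((cs.reverse.map pvDv).reverse) : Int))
        = ((pvValLE zs : Nat) : Int) := by
      rw [e1, e2]
      simp only [zero_mul, zero_add]
      exact_mod_cast congrArg (Nat.cast : Nat → Int) hvsum
    rw [hsum]
    -- facts about zs
    have hcsne : cs ≠ [] := hne
    have hdlen : ds.length = cs.length := by simp [hds]
    have hzel : ∀ z ∈ zs, z ≤ 18 := by
      intro z hz
      rw [hzsdef] at hz
      rw [← hzsdef, ← hzs] at hz
      obtain ⟨p, hp, rfl⟩ := List.mem_map.mp hz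
      obtain ⟨h1, h2⟩ := List.of_mem_zip hp
      have := pv_dv_le p.1 (hdig p.1 h1)
      have := pv_dv_le p.2 (hdig p.2 (List.mem_reverse.mp h2))
      omega
    -- last element of zs is positive
    have hlne : cs.getLast? ≠ none :=
      fun h => hcsne (List.getLast?_eq_none_iff.mp h)
    obtain ⟨lc, hlc⟩ := Option.ne_none_iff_exists'.mp hlne
    have hlcd : PySem.Chars.isdigit lc = true := hdig lc (List.mem_of_getLast? hlc)
    have hlc0 : lc ≠ '0' := by rintro rfl; exact hg hlc
    have hlcpos := pv_dv_pos lc hlcd hlc0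
    obtain ⟨c0, ct, hcons⟩ := List.exists_cons_of_ne_nil hcsne
    have hds1 : ds = pvDv c0 :: ct.map pvDv := by rw [hds, hcons, List.map_cons]
    have hdr : ds.reverse.head? = some (pvDv lc) := by
      rw [List.head?_reverse, hds, List.getLast?_map, hlc]
      rfl
    obtain ⟨rest, hrest⟩ : ∃ rest, ds.reverse = pvDv lc :: rest := by
      cases h : ds.reverse with
      | nil => rw [h] at hdr; simp at hdr
      | cons e0 et =>
        rw [h] at hdr
        simp at hdr
        exact ⟨et, by rw [hdr]⟩
    have hzcons : zs = (pvDv c0 + pvDv lc) :: List.zipWith (· + ·) (ct.map pvDv) rest := by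
      rw [hzsdef, hrest, hds1, List.zipWith_cons_cons]
    have hrz : zs.reverse = (pvDv lc + pvDv c0) :: List.zipWith (· + ·) rest (ct.map pvDv) := by
      rw [hzsdef, List.reverse_zipWith (by simp), List.reverse_reverse, hrest, hds1,
          List.zipWith_cons_cons]
    have hzl : zs.getLast? = some (pvDv lc + pvDv c0) := by
      rw [← List.head?_reverse, hrz, List.head?_cons]
    have hzlast : zs.getLast? ≠ some 0 := by
      rw [hzl]
      intro hcon
      simp at hcon
      omega
    have hzne : zs ≠ [] := by rw [hzcons]; simp
    have hspos : 0 < pvValLE zs := pv_valLE_pos zs hzne hzlast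
    rw [pv_all_toChars _ hspos]
    have := pv_core zs 0 hzel (by omega) hzlast
    simp only [Nat.add_zero] at this
    rw [this]
    simp
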